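-- pv_equiv track=rewrite | github.com/Ayn1631/Enrollment-Consultation-System | backend/app/models.py | _expand_feature_dependencies
-- ===== SOURCE A (Python) =====
-- from typing import Literal
--
-- FeatureFlag = Literal["rag", "web_search", "skill_exec", "use_saved_skill", "citation_guard"]
--
-- FEATURE_DEPENDENCIES: dict[FeatureFlag, tuple[FeatureFlag, ...]] = {
--     "use_saved_skill": ("skill_exec",),
--     "citation_guard": ("rag",),
-- }
--
-- def _expand_feature_dependencies(features: list[FeatureFlag]) -> list[FeatureFlag]:
--     """按依赖关系补齐特性集合，保持输入顺序并避免重复。"""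
--     # 关键变量：expanded 是最终输出的有序特性列表。
--     expanded = list(dict.fromkeys(features))
--     changed = True
--     while changed:
--         changed = False
--         for feature in list(expanded):
--             for dependency in FEATURE_DEPENDENCIES.get(feature, ()):
--                 if dependency not in expanded:
--                     expanded.append(dependency)
--                     changed = True
--     return expanded
-- ===== SOURCE B (Python) =====
-- from typing import Literal
--
-- FeatureFlag = Literal["rag", "web_search", "skill_exec", "use_saved_skill", "citation_guard"]
--
-- FEATURE_DEPENDENCIES: dict[FeatureFlag, tuple[FeatureFlag, ...]] = {
--     "use_saved_skill": ("skill_exec",),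
--     "citation_guard": ("rag",),
-- }
--
-- def _expand_feature_dependencies(features: list[FeatureFlag]) -> list[FeatureFlag]:
--     """Single pass: the dependency table is one level deep (no dependency is itself
--     a key), so one sweep over the deduped input adds every missing dependency."""
--     expanded = list(dict.fromkeys(features))
--     seen = set(expanded)
--     for feature in list(expanded):
--         for dependency in FEATURE_DEPENDENCIES.get(feature, ()):
--             if dependency not in seen:
--                 expanded.append(dependency)
--                 seen.add(dependency)
--     return expanded
-- ===== Notes on version B (the rewrite author's own statement) =====
-- stated objective: simpler
-- what changed: Replaced the multi-pass `while changed` fixed-point iteration with a single linear pass over the deduped list plus a `seen` set, exact because the dependency table is one level deep (no dependency value is itself a key).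
import Mathlib
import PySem

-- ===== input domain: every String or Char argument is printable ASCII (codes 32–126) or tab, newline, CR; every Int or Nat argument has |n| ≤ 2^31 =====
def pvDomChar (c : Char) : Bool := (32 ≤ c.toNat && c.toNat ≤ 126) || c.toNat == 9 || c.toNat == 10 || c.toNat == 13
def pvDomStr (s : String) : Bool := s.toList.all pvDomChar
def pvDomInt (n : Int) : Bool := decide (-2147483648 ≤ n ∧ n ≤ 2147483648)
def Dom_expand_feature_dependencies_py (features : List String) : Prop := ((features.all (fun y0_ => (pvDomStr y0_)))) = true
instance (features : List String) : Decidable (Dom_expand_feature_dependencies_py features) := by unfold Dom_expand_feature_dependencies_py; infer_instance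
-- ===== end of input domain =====

-- B replaces A's `while changed` fixed-point loop by one linear pass with a `seen` set;
-- exact because the dependency table is one level deep. Objective: simpler.

-- FEATURE_DEPENDENCIES.get(feature, ()) (the module constant, shared by both sources)
def pyFeatureDeps (f : String) : List String :=
  if f = "use_saved_skill" then ["skill_exec"]
  else if f = "citation_guard" then ["rag"]
  else []

-- ===== PORT A =====
-- inner `for dependency in …: if dependency not in expanded: expanded.append(…); changed = True`
def expandStepA (st : List String × Bool) (f : String) : List String × Bool :=
  (pyFeatureDeps f).foldl
    (fun st d => if d ∈ st.1 then st else (st.1 ++ [d], true)) st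

-- one `for feature in list(expanded)` sweep, snapshot fixed at entry
def expandPassA (snapshot : List String) (st : List String × Bool) : List String × Bool :=
  snapshot.foldl expandStepA st

-- the `while changed` loop; fuel is a totality guard only: each pass with changed=True
-- makes every dependency of its snapshot present, and dependencies have no dependencies,
-- so at most 2 passes ever run (proved below); fuel 3 is never exhausted.
def expandLoopA : Nat → List String → List String
  | 0, e => e
  | fuel + 1, e =>
    let st := expandPassA e (e, false)
    if st.2 then expandLoopA fuel st.1 else st.1

def expand_feature_dependencies_py (features : List String) : List String :=
  expandLoopA 3 (PySem.List.dedup features)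

-- ===== PORT B =====
-- single sweep, membership via the companion `seen` set
def expandStepB (st : List String × PySem.Set String) (f : String) :
    List String × PySem.Set String :=
  (pyFeatureDeps f).foldl
    (fun st d => if PySem.Set.contains st.2 d then st else (st.1 ++ [d], PySem.Set.add st.2 d)) st

def expand_feature_dependencies_py_alt (features : List String) : List String :=
  let expanded := PySem.List.dedup features
  (expanded.foldl expandStepB (expanded, PySem.Set.ofList expanded)).1

-- ===== PRECONDITION & SPEC =====
def Spec_expand_feature_dependencies_py (features : List String) (out : List String) : Prop := out = expand_feature_dependencies_py_alt features
instance (features : List String) (out : List String) : Decidable (Spec_expand_feature_dependencies_py features out) := by unfold Spec_expand_feature_dependencies_py; infer_instance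

-- ===== CLAIM (what is proved, stated in full; the proofs are below) =====
def Claim_equal_expand_feature_dependencies_py : Prop := ∀ (features : List String), Dom_expand_feature_dependencies_py features → Spec_expand_feature_dependencies_py features (expand_feature_dependencies_py features)

-- ===== LEMMAS AND PROOFS =====

-- dependencies have no dependencies (the table is one level deep)
theorem deps_of_deps (f d : String) (h : d ∈ pyFeatureDeps f) : pyFeatureDeps d = [] := by
  unfold pyFeatureDeps at h ⊢
  split_ifs at h with h1 h2 <;> simp_all

-- A's inner fold only appends
theorem innerA_mono (ds : List String) (st : List String × Bool) :
    ∃ t, (ds.foldl (fun st d => if d ∈ st.1 then st else (st.1 ++ [d], true)) st).1 = st.1 ++ t ∧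
      ∀ x ∈ t, x ∈ ds := by
  induction ds generalizing st with
  | nil => exact ⟨[], by simp⟩
  | cons d ds ih =>
    simp only [List.foldl_cons]
    by_cases hd : d ∈ st.1
    · obtain ⟨t, ht, hm⟩ := ih st
      refine ⟨t, ?_, fun x hx => List.mem_cons_of_mem _ (hm x hx)⟩
      rw [if_pos hd]; exact ht
    · obtain ⟨t, ht, hm⟩ := ih (st.1 ++ [d], true)
      refine ⟨d :: t, ?_, ?_⟩
      · rw [if_neg hd, ht]; simp
      · intro x hx
        rcases List.mem_cons.mp hx with rfl | hx
        · exact List.mem_cons_self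
        · exact List.mem_cons_of_mem _ (hm x hx)

-- A's inner fold makes every element of ds present
theorem innerA_complete (ds : List String) (st : List String × Bool) :
    ∀ d ∈ ds, d ∈ (ds.foldl (fun st d => if d ∈ st.1 then st else (st.1 ++ [d], true)) st).1 := by
  induction ds generalizing st with
  | nil => simp
  | cons d ds ih =>
    intro x hx
    simp only [List.foldl_cons]
    rcases List.mem_cons.mp hx with rfl | hx
    · by_cases hd : x ∈ st.1
      · rw [if_pos hd]
        obtain ⟨t, ht, -⟩ := innerA_mono ds st
        rw [ht]; exact List.mem_append_left _ hd
      · rw [if_neg hd]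
        obtain ⟨t, ht, -⟩ := innerA_mono ds (st.1 ++ [x], true)
        rw [ht]; simp
    · exact ih _ x hx

-- a pass only appends, and what it appends are dependencies
theorem passA_mono (snapshot : List String) (st : List String × Bool) :
    ∃ t, (expandPassA snapshot st).1 = st.1 ++ t ∧ ∀ x ∈ t, pyFeatureDeps x = [] := by
  induction snapshot generalizing st with
  | nil => exact ⟨[], by simp [expandPassA]⟩
  | cons f fs ih =>
    obtain ⟨t1, ht1, hm1⟩ := innerA_mono (pyFeatureDeps f) st
    obtain ⟨t2, ht2, hm2⟩ := ih (expandStepA st f)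
    refine ⟨t1 ++ t2, ?_, ?_⟩
    · simp only [expandPassA, List.foldl_cons] at ht2 ⊢
      rw [ht2, expandStepA, ht1, List.append_assoc]
    · intro x hx
      rcases List.mem_append.mp hx with hx | hx
      · exact deps_of_deps f x (hm1 x hx)
      · exact hm2 x hx

-- a pass makes every dependency of its snapshot present in the result
theorem passA_complete (snapshot : List String) (st : List String × Bool) :
    ∀ f ∈ snapshot, ∀ d ∈ pyFeatureDeps f, d ∈ (expandPassA snapshot st).1 := by
  induction snapshot generalizing st with
  | nil => simp
  | cons g gs ih =>
    intro f hf d hd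
    simp only [expandPassA, List.foldl_cons] at *
    rcases List.mem_cons.mp hf with rfl | hf
    · have hd' : d ∈ (expandStepA st f).1 := by
        unfold expandStepA; exact innerA_complete _ st d hd
      obtain ⟨t, ht, -⟩ := passA_mono gs (expandStepA st f)
      simp only [expandPassA] at ht
      rw [ht]; exact List.mem_append_left _ hd'
    · exact ih (expandStepA st g) f hf d hd

-- a pass over a snapshot whose dependencies are all already present is the identity
theorem passA_fixed (snapshot : List String) (st : List String × Bool)
    (h : ∀ f ∈ snapshot, ∀ d ∈ pyFeatureDeps f, d ∈ st.1) :
    expandPassA snapshot st = st := by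
  induction snapshot generalizing st with
  | nil => simp [expandPassA]
  | cons f fs ih =>
    have hstep : expandStepA st f = st := by
      unfold expandStepA
      have hall : ∀ d ∈ pyFeatureDeps f, d ∈ st.1 := h f List.mem_cons_self
      generalize pyFeatureDeps f = ds at hall
      induction ds with
      | nil => simp
      | cons d ds ihd =>
        simp only [List.foldl_cons, hall d List.mem_cons_self, if_pos]
        exact ihd fun x hx => hall x (List.mem_cons_of_mem _ hx)
    simp only [expandPassA, List.foldl_cons, hstep]
    exact ih st fun g hg => h g (List.mem_cons_of_mem _ hg)

-- B's sweep equals A's first pass: the `seen` set mirrors list membership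
theorem stepB_eq_stepA (f : String) (e : List String) (s : PySem.Set String) (c : Bool)
    (inv : ∀ x, PySem.Set.contains s x = true ↔ x ∈ e) :
    (expandStepB (e, s) f).1 = (expandStepA (e, c) f).1 ∧
      ∀ x, PySem.Set.contains (expandStepB (e, s) f).2 x = true ↔ x ∈ (expandStepA (e, c) f).1 := by
  unfold expandStepB expandStepA
  generalize pyFeatureDeps f = ds
  induction ds generalizing e s c with
  | nil => exact ⟨rfl, inv⟩
  | cons d ds ih =>
    simp only [List.foldl_cons]
    by_cases hd : d ∈ e
    · rw [if_pos ((inv d).mpr hd), if_pos hd]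
      exact ih e s c inv
    · rw [if_neg (fun h => hd ((inv d).mp h)), if_neg hd]
      refine ih (e ++ [d]) (PySem.Set.add s d) true ?_
      intro x
      have hx := inv x
      rw [PySem.Set.contains_iff] at hx ⊢
      rw [PySem.Set.mem_add, hx]
      simp

theorem sweepB_eq_passA (snapshot e : List String) (s : PySem.Set String) (c : Bool)
    (inv : ∀ x, PySem.Set.contains s x = true ↔ x ∈ e) :
    (snapshot.foldl expandStepB (e, s)).1 = (expandPassA snapshot (e, c)).1 := by
  induction snapshot generalizing e s c with
  | nil => rfl
  | cons f fs ih =>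
    obtain ⟨h1, h2⟩ := stepB_eq_stepA f e s c inv
    show (fs.foldl expandStepB (expandStepB (e, s) f)).1 =
      (fs.foldl expandStepA (expandStepA (e, c) f)).1
    have hB : expandStepB (e, s) f = ((expandStepB (e, s) f).1, (expandStepB (e, s) f).2) := rfl
    have hA : expandStepA (e, c) f = ((expandStepA (e, c) f).1, (expandStepA (e, c) f).2) := rfl
    rw [hB, hA, h1]
    exact ih _ _ _ h2

-- ===== VERDICT (by name: the statement is the Claim_ definition above) =====
theorem expand_feature_dependencies_py_spec : Claim_equal_expand_feature_dependencies_py := by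
  intro features _
  show expandLoopA 3 (PySem.List.dedup features) =
    ((PySem.List.dedup features).foldl expandStepB
      (PySem.List.dedup features, PySem.Set.ofList (PySem.List.dedup features))).1
  set e0 := PySem.List.dedup features with he0
  have inv0 : ∀ x, PySem.Set.contains (PySem.Set.ofList e0) x = true ↔ x ∈ e0 := by
    intro x; simp [PySem.Set.mem_ofList]
  obtain ⟨⟨e1, c1⟩, he1⟩ : ∃ p, expandPassA e0 (e0, false) = p := ⟨_, rfl⟩
  have hB : (e0.foldl expandStepB (e0, PySem.Set.ofList e0)).1 = e1 := by
    have h := sweepB_eq_passA e0 e0 (PySem.Set.ofList e0) false inv0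
    rw [he1] at h; exact h
  have hfix : ∀ f ∈ e1, ∀ d ∈ pyFeatureDeps f, d ∈ e1 := by
    intro f hf d hd
    obtain ⟨t, ht, hdeps⟩ := passA_mono e0 (e0, false)
    rw [he1] at ht
    have ht' : e1 = e0 ++ t := ht
    rcases List.mem_append.mp (ht' ▸ hf) with hf0 | hft
    · have h := passA_complete e0 (e0, false) f hf0 d hd
      rw [he1] at h; exact h
    · rw [hdeps f hft] at hd; cases hd
  have l3 : expandLoopA 3 e0 = if c1 then expandLoopA 2 e1 else e1 := by
    show (if (expandPassA e0 (e0, false)).2 then expandLoopA 2 (expandPassA e0 (e0, false)).1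
      else (expandPassA e0 (e0, false)).1) = _
    rw [he1]
  rw [hB]
  cases c1 with
  | false => simpa using l3
  | true =>
    have hp : expandPassA e1 (e1, false) = (e1, false) := passA_fixed e1 (e1, false) hfix
    have l2 : expandLoopA 2 e1 = e1 := by
      show (if (expandPassA e1 (e1, false)).2 then expandLoopA 1 (expandPassA e1 (e1, false)).1
        else (expandPassA e1 (e1, false)).1) = e1
      rw [hp]; simp
    rw [l3]; simpa using l2
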